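-- pv_equiv track=rewrite | github.com/yeelunz/Traking | tracking/utils/prediction_interpolation.py | _sorted_unique_frames
-- ===== SOURCE A (Python) =====
-- from typing import Dict, List, Optional, Sequence, Tuple
--
-- def _sorted_unique_frames(frame_indices: Optional[Sequence[int]]) -> List[int]:
--     if frame_indices is None:
--         return []
--     unique: set[int] = set()
--     for value in frame_indices:
--         try:
--             unique.add(int(value))
--         except Exception:
--             continue
--     return sorted(unique)
-- ===== SOURCE B (Python) =====
-- from typing import List, Optional, Sequence
--
-- def _insert_unique(v: int, xs: "List[int]") -> "List[int]":
--     # binary-search the insertion point in the sorted duplicate-free list xs,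
--     # then insert v there unless it is already present
--     lo, hi = 0, len(xs)
--     while lo < hi:
--         mid = (lo + hi) // 2
--         if xs[mid] < v:
--             lo = mid + 1
--         else:
--             hi = mid
--     if lo < len(xs) and xs[lo] == v:
--         return xs
--     xs.insert(lo, v)
--     return xs
--
-- def _sorted_unique_frames(frame_indices: "Optional[Sequence[int]]") -> List[int]:
--     if frame_indices is None:
--         return []
--     result: List[int] = []
--     for value in frame_indices:
--         try:
--             v = int(value)
--         except Exception:
--             continue
--         result = _insert_unique(v, result)
--     return result
-- ===== Notes on version B (the rewrite author's own statement) =====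
-- stated objective: alternative
-- what changed: Replaces A's hash-set accumulation followed by a sort with a single pass that maintains a sorted duplicate-free list, binary-searching each converted value's position (hand-rolled bisect) and inserting it there unless already present - no set and no sort call.
import Mathlib
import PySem

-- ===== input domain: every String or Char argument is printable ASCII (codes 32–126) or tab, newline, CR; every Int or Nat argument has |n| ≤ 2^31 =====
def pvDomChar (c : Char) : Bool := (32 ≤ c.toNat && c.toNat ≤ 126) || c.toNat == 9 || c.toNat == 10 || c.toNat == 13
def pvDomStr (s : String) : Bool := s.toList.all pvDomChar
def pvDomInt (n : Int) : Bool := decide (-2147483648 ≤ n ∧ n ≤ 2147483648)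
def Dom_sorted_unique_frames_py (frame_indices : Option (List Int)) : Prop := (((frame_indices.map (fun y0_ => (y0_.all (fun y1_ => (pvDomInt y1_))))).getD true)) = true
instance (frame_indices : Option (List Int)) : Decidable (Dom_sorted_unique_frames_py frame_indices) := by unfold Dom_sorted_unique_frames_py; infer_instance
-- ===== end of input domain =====

-- B replaces A's set-then-sort with one pass maintaining a sorted duplicate-free list,
-- binary-searching each value's position and inserting it there unless present; same return value.

-- ===== PORT A =====
-- int(value) on an Int is the identity and never raises, so the try/except skips nothing.
def sorted_unique_frames_py (frame_indices : Option (List Int)) : List Int :=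
  match frame_indices with
  | none => []
  | some xs =>
    let unique : PySem.Set Int := xs.foldl (fun s value => PySem.Set.add s value) PySem.Set.empty
    PySem.List.sorted unique (fun x => x) false

-- ===== PORT B =====
-- the 'while lo < hi' binary-search loop; xs[mid] is always in range when called with hi ≤ len xs,
-- so getD's default is never used there
-- (fuel = hi - lo bounds the iteration count and only makes the recursion structural)
def bisectLeftAux (xs : List Int) (v : Int) : Nat → Nat → Nat → Nat
  | 0, lo, _ => lo
  | fuel + 1, lo, hi =>
    if lo < hi then
      let mid := (lo + hi) / 2
      if xs.getD mid 0 < v then bisectLeftAux xs v fuel (mid + 1) hi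
      else bisectLeftAux xs v fuel lo mid
    else lo

def bisectLeft (xs : List Int) (v : Int) (lo hi : Nat) : Nat :=
  bisectLeftAux xs v (hi - lo) lo hi

-- 'lo < len(xs) and xs[lo] == v' is xs[lo]? = some v; xs.insert(lo, v) with 0 ≤ lo ≤ len xs
-- is exactly take/drop splicing
def insertUniqueB (v : Int) (xs : List Int) : List Int :=
  let lo := bisectLeft xs v 0 xs.length
  if xs[lo]? = some v then xs
  else xs.take lo ++ [v] ++ xs.drop lo

def sorted_unique_frames_py_alt (frame_indices : Option (List Int)) : List Int :=
  match frame_indices with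
  | none => []
  | some xs => xs.foldl (fun result value => insertUniqueB value result) []

-- ===== PRECONDITION & SPEC =====
def Spec_sorted_unique_frames_py (frame_indices : Option (List Int)) (out : List Int) : Prop := out = sorted_unique_frames_py_alt frame_indices
instance (frame_indices : Option (List Int)) (out : List Int) : Decidable (Spec_sorted_unique_frames_py frame_indices out) := by unfold Spec_sorted_unique_frames_py; infer_instance

-- ===== CLAIM (what is proved, stated in full; the proofs are below) =====
def Claim_equal_sorted_unique_frames_py : Prop := ∀ (frame_indices : Option (List Int)), Dom_sorted_unique_frames_py frame_indices → Spec_sorted_unique_frames_py frame_indices (sorted_unique_frames_py frame_indices)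

-- ===== LEMMAS AND PROOFS =====

-- linear characterisation of the insertion point (proof helper only)
def insertPos (v : Int) : List Int → Nat
  | [] => 0
  | x :: xs => if x < v then insertPos v xs + 1 else 0

-- recursive characterisation of B's step (proof helper only)
def insertUnique (v : Int) : List Int → List Int
  | [] => [v]
  | x :: xs => if v < x then v :: x :: xs else if v = x then x :: xs else x :: insertUnique v xs

lemma insertPos_spec (v : Int) (xs : List Int) :
    (∀ j < insertPos v xs, xs.getD j 0 < v) ∧ insertPos v xs ≤ xs.length ∧
    (insertPos v xs < xs.length → ¬ xs.getD (insertPos v xs) 0 < v) := by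
  induction xs with
  | nil => simp [insertPos]
  | cons x t ih =>
    obtain ⟨ih1, ih2, ih3⟩ := ih
    simp only [insertPos]
    by_cases hx : x < v
    · rw [if_pos hx]
      refine ⟨?_, by simp; omega, ?_⟩
      · intro j hj
        cases j with
        | zero => simpa using hx
        | succ k => simpa using ih1 k (by omega)
      · intro hlt
        simpa using ih3 (by simpa using hlt)
    · rw [if_neg hx]
      exact ⟨by omega, by omega, fun _ => by simpa using hx⟩

lemma insertPos_unique (v : Int) (xs : List Int) (r : Nat)
    (h1 : ∀ j < r, xs.getD j 0 < v) (h2 : r ≤ xs.length)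
    (h3 : r < xs.length → ¬ xs.getD r 0 < v) : r = insertPos v xs := by
  obtain ⟨p1, p2, p3⟩ := insertPos_spec v xs
  by_contra hne
  rcases Nat.lt_or_ge r (insertPos v xs) with h | h
  · exact h3 (by omega) (p1 r h)
  · have : insertPos v xs < r := by omega
    exact p3 (by omega) (h1 _ this)

lemma bisect_spec (xs : List Int) (v : Int)
    (hs : ∀ i j, (hij : i < j) → (hj : j < xs.length) → xs[i]'(by omega) < xs[j]'hj) :
    ∀ n lo hi, hi - lo ≤ n → lo ≤ hi → hi ≤ xs.length →
    (∀ j < lo, xs.getD j 0 < v) →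
    (∀ j, hi ≤ j → j < xs.length → ¬ xs.getD j 0 < v) →
    bisectLeftAux xs v n lo hi = insertPos v xs := by
  intro n
  induction n with
  | zero =>
    intro lo hi hn hlh hhl hlow hhigh
    have : lo = hi := by omega
    subst this
    exact insertPos_unique v xs lo hlow (by omega) (fun hlt => hhigh lo (le_refl _) hlt)
  | succ n ih =>
    intro lo hi hn hlh hhl hlow hhigh
    rw [bisectLeftAux]
    by_cases h : lo < hi
    · rw [if_pos h]
      have hmid1 : lo ≤ (lo + hi) / 2 := by omega
      have hmid2 : (lo + hi) / 2 < hi := by omega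
      by_cases hc : xs.getD ((lo + hi) / 2) 0 < v
      · rw [if_pos hc]
        refine ih _ _ (by omega) (by omega) hhl ?_ hhigh
        intro j hj
        by_cases hjm : j = (lo + hi) / 2
        · exact hjm ▸ hc
        · rcases Nat.lt_or_ge j lo with h' | h'
          · exact hlow j h'
          · have hjlen : j < xs.length := by omega
            have hmlen : (lo + hi) / 2 < xs.length := by omega
            have : xs[j]'hjlen < xs[(lo + hi) / 2]'hmlen := hs j _ (by omega) hmlen
            rw [List.getD_eq_getElem xs 0 hjlen]
            rw [List.getD_eq_getElem xs 0 hmlen] at hc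
            omega
      · rw [if_neg hc]
        refine ih _ _ (by omega) (by omega) (by omega) hlow ?_
        intro j hj hjlen
        rcases Nat.eq_or_lt_of_le hj with h' | h'
        · exact h' ▸ hc
        · have hmlen : (lo + hi) / 2 < xs.length := by omega
          have : xs[(lo + hi) / 2]'hmlen < xs[j]'hjlen := hs _ j h' hjlen
          rw [List.getD_eq_getElem xs 0 hjlen]
          rw [List.getD_eq_getElem xs 0 hmlen] at hc
          omega
    · rw [if_neg h]
      have : lo = hi := by omega
      subst this
      exact insertPos_unique v xs lo hlow (by omega) (fun hlt => hhigh lo (le_refl _) hlt)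

-- B's step on a strictly sorted list equals the recursive characterisation
lemma insertUniqueB_eq (v : Int) (xs : List Int) (hs : xs.Pairwise (· < ·)) :
    insertUniqueB v xs = insertUnique v xs := by
  have hidx : ∀ i j, (hij : i < j) → (hj : j < xs.length) → xs[i]'(by omega) < xs[j]'hj := by
    intro i j hij hj
    exact List.pairwise_iff_getElem.mp hs i j (by omega) hj hij
  have hb : bisectLeft xs v 0 xs.length = insertPos v xs :=
    bisect_spec xs v hidx (xs.length - 0) 0 xs.length (by omega) (by omega) (le_refl _)
      (by omega) (fun j hj hjl => by omega)
  unfold insertUniqueB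
  rw [hb]
  -- now prove the splice at insertPos equals insertUnique, by induction on xs
  clear hb hidx hs
  induction xs with
  | nil => simp [insertPos, insertUnique]
  | cons x t ih =>
    simp only [insertPos, insertUnique]
    by_cases hxv : x < v
    · have h1 : ¬ v < x := by omega
      have h2 : v ≠ x := by omega
      simp only [if_pos hxv, if_neg h1, if_neg h2]
      rw [List.getElem?_cons_succ]
      by_cases hg : t[insertPos v t]? = some v
      · rw [if_pos hg] at ih ⊢
        rw [← ih]
      · rw [if_neg hg] at ih ⊢
        simp only [List.take_succ_cons, List.drop_succ_cons, List.cons_append]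
        rw [← ih]
    · simp only [if_neg hxv, List.getElem?_cons_zero, List.take_zero, List.drop_zero,
        List.nil_append]
      by_cases hvx : v < x
      · have : ¬ (some x = some v) := by simp; omega
        simp [this, if_pos hvx]
      · have hvex : v = x := by omega
        simp [hvex]

lemma mem_insertUnique (v : Int) (xs : List Int) (a : Int) :
    a ∈ insertUnique v xs ↔ a = v ∨ a ∈ xs := by
  induction xs with
  | nil => simp [insertUnique]
  | cons x t ih =>
    simp only [insertUnique]
    split_ifs with h1 h2
    · simp
    · subst h2; simp
    · simp [ih]; tauto

lemma pairwise_insertUnique (v : Int) (xs : List Int) (h : xs.Pairwise (· < ·)) :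
    (insertUnique v xs).Pairwise (· < ·) := by
  induction xs with
  | nil => simp [insertUnique]
  | cons x t ih =>
    rcases List.pairwise_cons.mp h with ⟨hx, ht⟩
    simp only [insertUnique]
    split_ifs with h1 h2
    · exact List.pairwise_cons.mpr ⟨by
        intro a ha
        rcases List.mem_cons.mp ha with rfl | ha'
        · exact h1
        · exact lt_trans h1 (hx a ha'), h⟩
    · exact h
    · have hxv : x < v := by omega
      refine List.pairwise_cons.mpr ⟨?_, ih ht⟩
      intro a ha
      rcases (mem_insertUnique v t a).mp ha with rfl | ha'
      · exact hxv
      · exact hx a ha'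

-- B's fold equals the fold of the recursive characterisation (the accumulator stays sorted)
lemma foldB_eq (xs : List Int) (acc : List Int) (hacc : acc.Pairwise (· < ·)) :
    xs.foldl (fun result value => insertUniqueB value result) acc
      = xs.foldl (fun result value => insertUnique value result) acc := by
  induction xs generalizing acc with
  | nil => rfl
  | cons x t ih =>
    simp only [List.foldl_cons]
    rw [insertUniqueB_eq x acc hacc]
    exact ih (insertUnique x acc) (pairwise_insertUnique x acc hacc)

lemma fold_invariant (xs : List Int) (acc : List Int) (hacc : acc.Pairwise (· < ·)) :
    (xs.foldl (fun result value => insertUnique value result) acc).Pairwise (· < ·) ∧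
    (∀ a, a ∈ xs.foldl (fun result value => insertUnique value result) acc ↔ a ∈ acc ∨ a ∈ xs) := by
  induction xs generalizing acc with
  | nil => exact ⟨hacc, by simp⟩
  | cons x t ih =>
    simp only [List.foldl_cons]
    obtain ⟨p, m⟩ := ih (insertUnique x acc) (pairwise_insertUnique x acc hacc)
    refine ⟨p, fun a => ?_⟩
    rw [m a, mem_insertUnique]
    simp; tauto

-- ===== VERDICT (by name: the statement is the Claim_ definition above) =====
theorem sorted_unique_frames_py_spec : Claim_equal_sorted_unique_frames_py := by
  intro fi _
  unfold Spec_sorted_unique_frames_py sorted_unique_frames_py sorted_unique_frames_py_alt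
  cases fi with
  | none => rfl
  | some xs =>
    dsimp only
    have hA : xs.foldl (fun s value => PySem.Set.add s value) PySem.Set.empty = PySem.Set.ofList xs := by
      rw [PySem.Set.ofList_eq_foldl]; rfl
    rw [hA, foldB_eq xs [] List.Pairwise.nil]
    obtain ⟨hpw, hmem⟩ := fold_invariant xs [] List.Pairwise.nil
    set r := xs.foldl (fun result value => insertUnique value result) [] with hr
    have hrnodup : r.Nodup := hpw.imp (fun h => ne_of_lt h)
    have hperm : r.Perm (PySem.Set.ofList xs) := by
      rw [List.perm_ext_iff_of_nodup hrnodup (PySem.Set.nodup_ofList xs)]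
      intro a
      rw [hmem a]
      simp [PySem.Set.mem_ofList]
    exact (PySem.List.sorted_eq_of_perm_of_pairwise_lt (PySem.Set.ofList xs) r (fun x => x) hperm (by simpa using hpw))
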